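-- pv_equiv track=rewrite | github.com/danielbultrini/Clean_Dirty_Qubits | hamiltonian_utils.py | tfim_1d_ops
-- ===== SOURCE A (Python) =====
-- def tfim_1d_ops(n_qubits):
--     """Returns list of measurements in operator format"""
--     ops = []
--
--     for n in range(n_qubits - 1):
--         ops.append("".join(["Z" if i == n else "I" for i in range(n_qubits)]))
--         ops.append(
--             "".join(["X" if (i == n or i == n + 1) else "I" for i in range(n_qubits)])
--         )
--
--     ops.append("".join(["Z" if i == n_qubits - 1 else "I" for i in range(n_qubits)]))
--     ops.append(
--         "".join(
--             ["X" if (i == 0 or i == n_qubits - 1) else "I" for i in range(n_qubits)]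
--         )
--     )
--
--     return ops
-- ===== SOURCE B (Python) =====
-- def tfim_1d_ops(n_qubits):
--     """Returns list of measurements in operator format"""
--     zpat = ("Z" + "I" * n_qubits)[:n_qubits]
--     xpat = ("XX" + "I" * n_qubits)[:n_qubits]
--     ops = []
--     for k in range(n_qubits):
--         cut = n_qubits - k
--         ops.append(zpat[cut:] + zpat[:cut])
--         ops.append(xpat[cut:] + xpat[:cut])
--     return ops
-- ===== Notes on version B (the rewrite author's own statement) =====
-- stated objective: faster
-- what changed: B builds one Z pattern 'ZI...I' and one X pattern 'XXI...I' once and emits each operator as a cyclic rotation of the pattern in a single uniform loop over all n sites (the periodic boundary term is just the rotation at the last site), instead of A's loop constructing every string position-by-position with conditional comprehensions plus a special-cased tail pair — each string becomes two O(n) slice copies instead of an n-element Python-level loop with per-position conditionals; …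
-- intended difference: At n_qubits == 0 A returns ['',''] (its always-appended tail pair of empty strings, an artefact of the unconditional trailing appends), while B returns [], the intended empty operator list for a system with no qubits. — e.g. on tfim_1d_ops(0): A returns ["", ""], B returns []
-- outside the precondition, e.g. on tfim_1d_ops(-2): A returns ['', ''], B returns []
import Mathlib
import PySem

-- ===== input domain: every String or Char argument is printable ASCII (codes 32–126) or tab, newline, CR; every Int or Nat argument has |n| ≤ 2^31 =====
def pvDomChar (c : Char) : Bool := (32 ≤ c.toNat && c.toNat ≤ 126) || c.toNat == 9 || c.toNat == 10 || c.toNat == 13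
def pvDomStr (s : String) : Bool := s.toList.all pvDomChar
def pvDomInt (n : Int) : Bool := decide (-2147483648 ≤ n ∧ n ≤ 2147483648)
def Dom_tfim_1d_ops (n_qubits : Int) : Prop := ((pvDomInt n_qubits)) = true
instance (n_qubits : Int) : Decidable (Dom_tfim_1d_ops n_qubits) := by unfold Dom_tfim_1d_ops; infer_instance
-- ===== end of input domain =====

-- B builds a single Z pattern and a single X pattern once and emits every operator as a
-- cyclic rotation of that pattern in one uniform loop over all n sites (the periodic term
-- is the rotation at the last site), instead of A's position-by-position conditional
-- comprehensions with a special-cased tail pair; objective: faster by a constant factor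
-- (slice copies instead of per-position Python-level conditionals; measured by the check).
-- For n_qubits = 0, B returns [] while A returns ["",""] (see D_ below).

-- ===== PORT A =====
def tfim_1d_ops (n_qubits : Int) : List String :=
  let ops : List String :=
    (PySem.List.pyRange 0 (n_qubits - 1)).foldl
      (fun ops n =>
        (ops ++ [String.ofList ((PySem.List.pyRange 0 n_qubits).map
                  (fun i => if i = n then 'Z' else 'I'))]) ++
        [String.ofList ((PySem.List.pyRange 0 n_qubits).map
                  (fun i => if i = n ∨ i = n + 1 then 'X' else 'I'))])
      []
  ((ops ++ [String.ofList ((PySem.List.pyRange 0 n_qubits).map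
             (fun i => if i = n_qubits - 1 then 'Z' else 'I'))]) ++
   [String.ofList ((PySem.List.pyRange 0 n_qubits).map
             (fun i => if i = 0 ∨ i = n_qubits - 1 then 'X' else 'I'))])

-- ===== PORT B =====
-- zpat = ("Z" + "I" * n_qubits)[:n_qubits]  ("I"*m is empty for m ≤ 0, hence toNat; exact)
def pvZPat (n_qubits : Int) : List Char :=
  PySem.List.slice ('Z' :: List.replicate n_qubits.toNat 'I') none (some n_qubits)

-- xpat = ("XX" + "I" * n_qubits)[:n_qubits]
def pvXPat (n_qubits : Int) : List Char :=
  PySem.List.slice ('X' :: 'X' :: List.replicate n_qubits.toNat 'I') none (some n_qubits)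

def tfim_1d_ops_alt (n_qubits : Int) : List String :=
  let zpat := pvZPat n_qubits
  let xpat := pvXPat n_qubits
  (PySem.List.pyRange 0 n_qubits).foldl
    (fun ops k =>
      let cut := n_qubits - k
      (ops ++ [String.ofList (PySem.List.slice zpat (some cut) none ++
                          PySem.List.slice zpat none (some cut))]) ++
      [String.ofList (PySem.List.slice xpat (some cut) none ++
                  PySem.List.slice xpat none (some cut))])
    []

-- ===== PRECONDITION & SPEC =====
-- Pre_ excludes negative qubit counts, which lie outside the natural domain of the task
-- (a number of qubits); A happens to return ["",""] there, an accident of its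
-- unconditional trailing appends.
def Pre_tfim_1d_ops (n_qubits : Int) : Prop := 0 ≤ n_qubits
instance (n_qubits : Int) : Decidable (Pre_tfim_1d_ops n_qubits) := by unfold Pre_tfim_1d_ops; infer_instance
def pvWitness_tfim_1d_ops : Int := 3

-- For n_qubits = 0 A returns ["",""] (its always-appended tail pair of empty strings, an
-- artefact of the unconditional trailing appends), while B returns [], the intended empty
-- operator list for a system with no qubits.
def D_tfim_1d_ops (n_qubits : Int) : Prop := n_qubits = 0
instance (n_qubits : Int) : Decidable (D_tfim_1d_ops n_qubits) := by unfold D_tfim_1d_ops; infer_instance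

def Spec_tfim_1d_ops (n_qubits : Int) (out : List String) : Prop :=
  ¬ D_tfim_1d_ops n_qubits → out = tfim_1d_ops_alt n_qubits
instance (n_qubits : Int) (out : List String) : Decidable (Spec_tfim_1d_ops n_qubits out) := by unfold Spec_tfim_1d_ops; infer_instance

def pvDiffWitness_tfim_1d_ops : Int := 0
def pvDiffWitnessOut_tfim_1d_ops : (List String) × (List String) := (["", ""], [])

-- ===== CLAIM (what is proved, stated in full; the proofs are below) =====
def Claim_unchanged_tfim_1d_ops : Prop :=
  ∀ (n_qubits : Int), Dom_tfim_1d_ops n_qubits → Pre_tfim_1d_ops n_qubits →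
    Spec_tfim_1d_ops n_qubits (tfim_1d_ops n_qubits)
def Claim_changed_tfim_1d_ops : Prop :=
  Dom_tfim_1d_ops (pvDiffWitness_tfim_1d_ops) ∧ Pre_tfim_1d_ops (pvDiffWitness_tfim_1d_ops) ∧
  D_tfim_1d_ops (pvDiffWitness_tfim_1d_ops) ∧
  tfim_1d_ops (pvDiffWitness_tfim_1d_ops) = pvDiffWitnessOut_tfim_1d_ops.1 ∧
  tfim_1d_ops_alt (pvDiffWitness_tfim_1d_ops) = pvDiffWitnessOut_tfim_1d_ops.2 ∧
  pvDiffWitnessOut_tfim_1d_ops.1 ≠ pvDiffWitnessOut_tfim_1d_ops.2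
def Claim_exact_tfim_1d_ops : Prop :=
  ∀ (n_qubits : Int), Dom_tfim_1d_ops n_qubits → Pre_tfim_1d_ops n_qubits →
    D_tfim_1d_ops n_qubits → tfim_1d_ops n_qubits ≠ tfim_1d_ops_alt n_qubits

-- ===== LEMMAS AND PROOFS =====

-- pyRange from 0 as a mapped List.range (also for negative upper bound, where both are empty)
theorem pv_pyRange_zero_toNat (n : Int) :
    PySem.List.pyRange 0 n = (List.range n.toNat).map (fun k : Nat => (k : Int)) := by
  rcases le_or_gt 0 n with h | h
  · rw [← Int.toNat_of_nonneg h, PySem.List.pyRange_zero_natCast]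
    simp [max_eq_left h]
  · rw [Int.toNat_of_nonpos (le_of_lt h)]
    simp [PySem.List.pyRange]
    omega

-- the Z pattern for n ≥ 1
theorem pv_zpat_eq (n : Int) (h : 1 ≤ n) :
    pvZPat n = 'Z' :: List.replicate (n.toNat - 1) 'I' := by
  unfold pvZPat
  rw [PySem.List.slice_to _ (by omega : (0:Int) ≤ n)]
  have hn : n.toNat = (n.toNat - 1) + 1 := by omega
  have hmin : min (n.toNat - 1) (n.toNat - 1 + 1) = n.toNat - 1 + 1 - 1 := by omega
  rw [hn, List.take_succ_cons, List.take_replicate, hmin]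

-- the X pattern for n ≥ 2
theorem pv_xpat_eq (n : Int) (h : 2 ≤ n) :
    pvXPat n = 'X' :: 'X' :: List.replicate (n.toNat - 2) 'I' := by
  unfold pvXPat
  rw [PySem.List.slice_to _ (by omega : (0:Int) ≤ n)]
  have hn : n.toNat = ((n.toNat - 2) + 1) + 1 := by omega
  have hmin : min (n.toNat - 2) (n.toNat - 2 + 1 + 1) = n.toNat - 2 + 1 + 1 - 2 := by omega
  rw [hn, List.take_succ_cons, List.take_succ_cons, List.take_replicate, hmin]

-- A's conditional-comprehension Z-string equals B's rotated Z pattern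
theorem pv_z_eq (n k : Int) (hn : 1 ≤ n) (h0 : 0 ≤ k) (hk : k < n) :
    String.ofList ((PySem.List.pyRange 0 n).map (fun i => if i = k then 'Z' else 'I')) =
      String.ofList (PySem.List.slice (pvZPat n) (some (n - k)) none ++
                 PySem.List.slice (pvZPat n) none (some (n - k))) := by
  rw [pv_zpat_eq n hn, pv_pyRange_zero_toNat, List.map_map,
    PySem.List.slice_from _ (by omega : (0:Int) ≤ n - k),
    PySem.List.slice_to _ (by omega : (0:Int) ≤ n - k)]
  congr 1
  have hc : (n - k).toNat = n.toNat - k.toNat := by omega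
  apply List.ext_getElem
  · simp; omega
  · intro t h1 h2
    simp only [List.length_map, List.length_range] at h1
    simp only [List.getElem_map, List.getElem_range, Function.comp_apply,
      List.getElem_append, List.getElem_drop, List.getElem_take, List.getElem_cons,
      List.getElem_replicate, List.length_drop, List.length_cons,
      List.length_replicate, hc]
    split_ifs <;> first | rfl | (exfalso; omega)

-- A's in-loop X-string at site k equals B's rotated X pattern (k < n-1)
theorem pv_x_mid_eq (n k : Int) (h0 : 0 ≤ k) (hk : k < n - 1) :
    String.ofList ((PySem.List.pyRange 0 n).map (fun i => if i = k ∨ i = k + 1 then 'X' else 'I')) =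
      String.ofList (PySem.List.slice (pvXPat n) (some (n - k)) none ++
                 PySem.List.slice (pvXPat n) none (some (n - k))) := by
  rw [pv_xpat_eq n (by omega), pv_pyRange_zero_toNat, List.map_map,
    PySem.List.slice_from _ (by omega : (0:Int) ≤ n - k),
    PySem.List.slice_to _ (by omega : (0:Int) ≤ n - k)]
  congr 1
  have hc : (n - k).toNat = n.toNat - k.toNat := by omega
  apply List.ext_getElem
  · simp; omega
  · intro t h1 h2
    simp only [List.length_map, List.length_range] at h1
    simp only [List.getElem_map, List.getElem_range, Function.comp_apply,
      List.getElem_append, List.getElem_drop, List.getElem_take, List.getElem_cons,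
      List.getElem_replicate, List.length_drop, List.length_cons,
      List.length_replicate, hc]
    split_ifs <;> first | rfl | (exfalso; omega)

-- A's trailing periodic X-string equals B's rotated X pattern at the last site (n ≥ 2)
theorem pv_x_tail_eq (n : Int) (hn : 2 ≤ n) :
    String.ofList ((PySem.List.pyRange 0 n).map (fun i => if i = 0 ∨ i = n - 1 then 'X' else 'I')) =
      String.ofList (PySem.List.slice (pvXPat n) (some (n - (n - 1))) none ++
                 PySem.List.slice (pvXPat n) none (some (n - (n - 1)))) := by
  rw [pv_xpat_eq n hn, pv_pyRange_zero_toNat, List.map_map,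
    (by omega : n - (n - 1) = (1:Int)),
    PySem.List.slice_from _ (by omega : (0:Int) ≤ 1),
    PySem.List.slice_to _ (by omega : (0:Int) ≤ 1)]
  congr 1
  apply List.ext_getElem
  · simp; omega
  · intro t h1 h2
    simp only [List.length_map, List.length_range] at h1
    simp only [List.getElem_map, List.getElem_range, Function.comp_apply,
      List.getElem_append, List.getElem_drop, List.getElem_take, List.getElem_cons,
      List.getElem_replicate, List.length_drop, List.length_cons,
      List.length_replicate]
    split_ifs <;> first | rfl | (exfalso; omega)

-- an append-append loop body flattened to a flatMap
theorem pv_foldl2 {α β : Type} (f g : α → β) (l : List α) (acc : List β) :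
    l.foldl (fun acc k => (acc ++ [f k]) ++ [g k]) acc =
      acc ++ l.flatMap (fun k => [f k, g k]) := by
  have h : (fun (acc : List β) k => (acc ++ [f k]) ++ [g k]) =
      fun acc k => acc ++ [f k, g k] := by
    funext acc k; simp
  rw [h, PySem.List.foldl_append_eq_flatMap]

-- ===== VERDICT (by name: the statements are the Claim_ definitions above) =====
theorem tfim_1d_ops_spec : Claim_unchanged_tfim_1d_ops := by
  intro n _ hPre hD
  have hn : 1 ≤ n := by unfold Pre_tfim_1d_ops at hPre; unfold D_tfim_1d_ops at hD; omega
  show tfim_1d_ops n = tfim_1d_ops_alt n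
  rcases eq_or_lt_of_le hn with h1 | h2
  · rw [← h1]; decide
  · unfold tfim_1d_ops tfim_1d_ops_alt
    dsimp only
    rw [pv_foldl2, pv_foldl2, List.nil_append, List.nil_append]
    have hsplit : PySem.List.pyRange 0 n = PySem.List.pyRange 0 (n - 1) ++ [n - 1] := by
      have h := PySem.List.pyRange_one_succ_right (a := 0) (b := n - 1) (by omega)
      rw [(by omega : n - 1 + 1 = n)] at h
      exact h
    have hB : (PySem.List.pyRange 0 n).flatMap
        (fun k => [String.ofList (PySem.List.slice (pvZPat n) (some (n - k)) none ++
                              PySem.List.slice (pvZPat n) none (some (n - k))),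
                   String.ofList (PySem.List.slice (pvXPat n) (some (n - k)) none ++
                              PySem.List.slice (pvXPat n) none (some (n - k)))]) =
        (PySem.List.pyRange 0 (n - 1)).flatMap
        (fun k => [String.ofList (PySem.List.slice (pvZPat n) (some (n - k)) none ++
                              PySem.List.slice (pvZPat n) none (some (n - k))),
                   String.ofList (PySem.List.slice (pvXPat n) (some (n - k)) none ++
                              PySem.List.slice (pvXPat n) none (some (n - k)))]) ++
        [String.ofList (PySem.List.slice (pvZPat n) (some (n - (n - 1))) none ++
                    PySem.List.slice (pvZPat n) none (some (n - (n - 1)))),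
         String.ofList (PySem.List.slice (pvXPat n) (some (n - (n - 1))) none ++
                    PySem.List.slice (pvXPat n) none (some (n - (n - 1))))] := by
      rw [hsplit, List.flatMap_append]
      simp
    rw [hB, List.append_assoc]
    congr 1
    · apply List.flatMap_congr
      intro k hk
      rw [PySem.List.mem_pyRange_one] at hk
      rw [pv_z_eq n k hn hk.1 (by omega), pv_x_mid_eq n k hk.1 (by omega)]
    · rw [pv_z_eq n (n - 1) hn (by omega) (by omega), pv_x_tail_eq n (by omega)]
      rfl

theorem tfim_1d_ops_changed : Claim_changed_tfim_1d_ops := by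
  unfold Claim_changed_tfim_1d_ops; decide

theorem tfim_1d_ops_tight : Claim_exact_tfim_1d_ops := by
  intro n _ _ hD
  unfold D_tfim_1d_ops at hD
  subst hD
  decide
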